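-- pv_equiv track=rewrite | github.com/phpinto/data_structures_and_algorithms | arrays/rooks_are_safe.py | rooks_are_safe
-- ===== SOURCE A (Python) =====
-- def rooks_are_safe(chess_board):
--     row_set, col_set = set(), set()
--     for i in range(len(chess_board)):
--         for j in range(len(chess_board[0])):
--             if chess_board[i][j] == 1:
--                 if (i in row_set) or (j in col_set):
--                     return False
--                 row_set.add(i)
--                 col_set.add(j)
--     return True
-- ===== SOURCE B (Python) =====
-- def rooks_are_safe(chess_board):
--     rooks = [(i, j)
--              for i, row in enumerate(chess_board)
--              for j, val in enumerate(row)
--              if val == 1]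
--     return all(a[0] != b[0] and a[1] != b[1]
--                for k, a in enumerate(rooks)
--                for b in rooks[k + 1:])
-- ===== Notes on version B (the rewrite author's own statement) =====
-- stated objective: alternative
-- what changed: A scans the grid with two mutable index sets and returns False at the first clash; B first extracts the list of rook coordinates and then checks every pair of rooks for a shared row or column (pairwise comparison instead of incremental set membership). Pre_ excludes ragged boards on which A's fixed width matters: A raises IndexError when a later row is shorter than row 0, and silently ignores rooks beyond row 0's width, an artefact of indexing every row with range(len(chess_board[0])).
-- outside the precondition, e.g. on rooks_are_safe([[0], [1, 1]]): A returns True, B returns False; on rooks_are_safe([[1, 1], [1]]): A returns False, B returns False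
import Mathlib
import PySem

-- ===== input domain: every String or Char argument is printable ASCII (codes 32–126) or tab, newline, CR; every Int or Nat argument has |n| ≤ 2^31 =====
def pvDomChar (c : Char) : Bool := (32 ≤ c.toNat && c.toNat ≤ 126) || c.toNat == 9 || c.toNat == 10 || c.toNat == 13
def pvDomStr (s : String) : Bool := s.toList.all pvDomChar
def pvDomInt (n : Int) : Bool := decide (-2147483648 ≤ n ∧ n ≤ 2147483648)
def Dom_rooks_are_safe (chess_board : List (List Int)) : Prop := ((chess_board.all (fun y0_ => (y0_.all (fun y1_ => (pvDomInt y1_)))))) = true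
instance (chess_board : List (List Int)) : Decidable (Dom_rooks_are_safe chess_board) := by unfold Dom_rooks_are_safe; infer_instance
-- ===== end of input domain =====

-- B replaces A's incremental scan with two mutable index sets by a different algorithm:
-- extract the list of rook coordinates, then compare every pair of rooks
-- (objective: alternative algorithm, similar cost; no speed claim).

-- ===== PORT A =====
-- inner loop 'for j in range(len(chess_board[0])): …' of A; 'none' = the early 'return False'
def rooksInner (row : List Int) (i : Nat) (rs cs : PySem.Set Nat) :
    List Nat → Option (PySem.Set Nat × PySem.Set Nat)
  | [] => some (rs, cs)
  | j :: js =>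
    if row.getD j 0 = 1 then
      if PySem.Set.contains rs i || PySem.Set.contains cs j then none
      else rooksInner row i (PySem.Set.add rs i) (PySem.Set.add cs j) js
    else rooksInner row i rs cs js

-- outer loop 'for i in range(len(chess_board)): …'
def rooksOuter (w : Nat) : List (List Int) → Nat → PySem.Set Nat → PySem.Set Nat → Bool
  | [], _, _, _ => true
  | row :: rest, i, rs, cs =>
    match rooksInner row i rs cs (List.range w) with
    | none => false
    | some (rs', cs') => rooksOuter w rest (i + 1) rs' cs'

def rooks_are_safe (chess_board : List (List Int)) : Bool :=
  rooksOuter (chess_board.headD []).length chess_board 0 PySem.Set.empty PySem.Set.empty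

-- ===== PORT B =====
-- inner comprehension 'for j, val in enumerate(row) if val == 1' (index carried as Nat)
def rowRooks (i : Nat) : List Int → Nat → List (Nat × Nat)
  | [], _ => []
  | v :: rest, j => (if v = 1 then [(i, j)] else []) ++ rowRooks i rest (j + 1)

-- outer comprehension 'for i, row in enumerate(chess_board)'
def rookCells : List (List Int) → Nat → List (Nat × Nat)
  | [], _ => []
  | row :: rest, i => rowRooks i row 0 ++ rookCells rest (i + 1)

-- 'all(a[0] != b[0] and a[1] != b[1] for k, a in enumerate(rooks) for b in rooks[k+1:])':
-- for the cons a :: rest of the rook list, rest is exactly rooks[k+1:]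
def pairsOK : List (Nat × Nat) → Bool
  | [] => true
  | a :: rest => rest.all (fun b => a.1 != b.1 && a.2 != b.2) && pairsOK rest

def rooks_are_safe_alt (chess_board : List (List Int)) : Bool :=
  pairsOK (rookCells chess_board 0)

-- ===== PRECONDITION & SPEC =====
-- Pre_ excludes ragged boards on which A's fixed width matters: A raises IndexError when a
-- later row is shorter than row 0, and silently ignores any rook beyond row 0's width, an
-- artefact of A indexing each row with range(len(chess_board[0])).
def Pre_rooks_are_safe (chess_board : List (List Int)) : Prop :=
  ∀ r ∈ chess_board,
    (chess_board.headD []).length ≤ r.length ∧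
    ∀ x ∈ r.drop (chess_board.headD []).length, x ≠ 1
instance (chess_board : List (List Int)) : Decidable (Pre_rooks_are_safe chess_board) := by
  unfold Pre_rooks_are_safe; infer_instance

def pvWitness_rooks_are_safe : List (List Int) := [[1, 0], [0, 1]]

def Spec_rooks_are_safe (chess_board : List (List Int)) (out : Bool) : Prop := out = rooks_are_safe_alt chess_board
instance (chess_board : List (List Int)) (out : Bool) : Decidable (Spec_rooks_are_safe chess_board out) := by unfold Spec_rooks_are_safe; infer_instance

-- ===== CLAIM (what is proved, stated in full; the proofs are below) =====
def Claim_equal_rooks_are_safe : Prop := ∀ (chess_board : List (List Int)), Dom_rooks_are_safe chess_board → Pre_rooks_are_safe chess_board → Spec_rooks_are_safe chess_board (rooks_are_safe chess_board)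

-- ===== LEMMAS AND PROOFS =====

-- rook columns of a row, as A's index loop sees them
def rcs (w : Nat) (row : List Int) : List Nat :=
  (List.range w).filter (fun j => row.getD j 0 == 1)

-- rook columns of a cell list starting at offset j
def colsAux : List Int → Nat → List Nat
  | [], _ => []
  | v :: rest, j => (if v = 1 then [j] else []) ++ colsAux rest (j + 1)

lemma innerStuck (row : List Int) (i : Nat) :
    ∀ (js : List Nat) (rs cs : PySem.Set Nat), PySem.Set.contains rs i = true →
      rooksInner row i rs cs js =
        if js.filter (fun j => row.getD j 0 == 1) = [] then some (rs, cs) else none := by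
  intro js
  induction js with
  | nil => intro rs cs _; simp [rooksInner]
  | cons j js ih =>
    intro rs cs h
    simp only [List.getD_eq_getElem?_getD] at *
    by_cases hv : row[j]?.getD 0 = 1
    · simp [rooksInner, hv, (PySem.Set.contains_iff _ _).mp h]
    · simp [rooksInner, hv, ih rs cs h]

lemma innerChar (row : List Int) (i : Nat) :
    ∀ (js : List Nat) (rs cs : PySem.Set Nat), PySem.Set.contains rs i = false →
      rooksInner row i rs cs js =
        match js.filter (fun j => row.getD j 0 == 1) with
        | [] => some (rs, cs)
        | [j] => if PySem.Set.contains cs j then none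
                 else some (PySem.Set.add rs i, PySem.Set.add cs j)
        | _ => none := by
  intro js
  induction js with
  | nil => intro rs cs _; simp [rooksInner]
  | cons j js ih =>
    intro rs cs h
    by_cases hv : row.getD j 0 = 1
    · by_cases hc : PySem.Set.contains cs j = true
      · simp only [rooksInner, h, hc, Bool.false_or, List.filter_cons,
          beq_iff_eq, if_pos hv]
        cases hf : js.filter (fun j => row.getD j 0 == 1) <;>
          simp [(PySem.Set.contains_iff _ _).mp hc]
      · have hci : PySem.Set.contains (PySem.Set.add rs i) i = true := by
          simp [PySem.Set.mem_add]
        have hjn : j ∉ cs := fun hm => hc ((PySem.Set.contains_iff _ _).mpr hm)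
        simp only [rooksInner, h, Bool.false_or, hc, List.filter_cons,
          beq_iff_eq, if_pos hv, innerStuck row i js _ _ hci]
        cases hf : js.filter (fun j => row.getD j 0 == 1)
        · simp [hjn]
        · simp
    · simp only [rooksInner, List.filter_cons, beq_iff_eq, if_neg hv]
      exact ih rs cs h

lemma outerChar (w : Nat) :
    ∀ (cb : List (List Int)) (i : Nat) (rs cs : PySem.Set Nat), (∀ x ∈ rs, x < i) →
      (rooksOuter w cb i rs cs = true ↔
        (∀ row ∈ cb, (rcs w row).length ≤ 1) ∧ (cb.flatMap (rcs w)).Nodup ∧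
          ∀ j ∈ cb.flatMap (rcs w), j ∉ cs) := by
  intro cb
  induction cb with
  | nil => intro i rs cs _; simp [rooksOuter]
  | cons row rest ih =>
    intro i rs cs hinv
    have hri : PySem.Set.contains rs i = false := by
      apply Bool.eq_false_iff.mpr
      intro hc
      exact absurd (hinv i ((PySem.Set.contains_iff _ _).mp hc)) (lt_irrefl i)
    rw [show rooksOuter w (row :: rest) i rs cs =
        (match rooksInner row i rs cs (List.range w) with
         | none => false
         | some (rs', cs') => rooksOuter w rest (i + 1) rs' cs') from rfl,
      innerChar row i (List.range w) rs cs hri]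
    cases hf : (List.range w).filter (fun j => row.getD j 0 == 1) with
    | nil =>
      simp only [List.flatMap_cons, rcs, hf, List.nil_append]
      rw [ih (i + 1) rs cs (fun x hx => Nat.lt_succ_of_lt (hinv x hx))]
      constructor
      · rintro ⟨h1, h2, h3⟩
        refine ⟨?_, h2, h3⟩
        intro r hr
        rcases List.mem_cons.mp hr with rfl | hr'
        · rw [hf]; simp
        · exact h1 r hr'
      · rintro ⟨h1, h2, h3⟩
        exact ⟨fun r hr => h1 r (List.mem_cons_of_mem _ hr), h2, h3⟩
    | cons j tl =>
      cases tl with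
      | nil =>
        by_cases hc : PySem.Set.contains cs j = true
        · simp only [hc, if_true]
          constructor
          · intro h; exact absurd h (by simp)
          · rintro ⟨_, _, h3⟩
            exact absurd (h3 j (by simp only [List.flatMap_cons, List.mem_append, rcs]; rw [hf]; simp)) (by simp [(PySem.Set.contains_iff _ _).mp hc])
        · have hjcs : j ∉ cs := fun hm => hc ((PySem.Set.contains_iff _ _).mpr hm)
          show (match (if PySem.Set.contains cs j = true then none
                 else some (PySem.Set.add rs i, PySem.Set.add cs j)) with
               | none => false
               | some (rs', cs') => rooksOuter w rest (i + 1) rs' cs') = true ↔ _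
          rw [if_neg hc]
          show rooksOuter w rest (i + 1) (PySem.Set.add rs i) (PySem.Set.add cs j) = true ↔ _
          rw [ih (i + 1) (PySem.Set.add rs i) (PySem.Set.add cs j)
              (by intro x hx
                  rcases (PySem.Set.mem_add _ _ _).mp hx with h | rfl
                  · exact Nat.lt_succ_of_lt (hinv x h)
                  · exact Nat.lt_succ_self x)]
          simp only [List.flatMap_cons, rcs, hf, List.cons_append, List.nil_append,
            List.nodup_cons, List.mem_cons]
          constructor
          · rintro ⟨h1, h2, h3⟩
            refine ⟨?_, ⟨?_, h2⟩, ?_⟩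
            · intro r hr
              rcases hr with rfl | hr'
              · rw [hf]; simp
              · exact h1 r hr'
            · intro hj
              exact absurd ((PySem.Set.mem_add _ _ _).mpr (Or.inr rfl)) (h3 j hj)
            · rintro x (rfl | hx)
              · exact hjcs
              · intro hxc
                exact h3 x hx ((PySem.Set.mem_add _ _ _).mpr (Or.inl hxc))
          · rintro ⟨h1, ⟨hjn, h2⟩, h3⟩
            refine ⟨fun r hr => h1 r (Or.inr hr), h2, ?_⟩
            intro x hx hxc
            rcases (PySem.Set.mem_add _ _ _).mp hxc with h | rfl
            · exact h3 x (Or.inr hx) h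
            · exact hjn hx
      | cons j' tl' =>
        simp only []
        constructor
        · intro h; exact absurd h (by simp)
        · rintro ⟨h1, _, _⟩
          have := h1 row (List.mem_cons_self)
          rw [rcs, hf] at this
          simp at this

lemma colsAux_shift : ∀ (cells : List Int) (s : Nat),
    colsAux cells (s + 1) = (colsAux cells s).map (· + 1) := by
  intro cells
  induction cells with
  | nil => intro s; simp [colsAux]
  | cons v rest ih =>
    intro s
    by_cases hv : v = 1 <;> simp [colsAux, hv, ih]

lemma colsAux_zero : ∀ (cells : List Int),
    colsAux cells 0 = (List.range cells.length).filter (fun j => cells.getD j 0 == 1) := by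
  intro cells
  induction cells with
  | nil => simp [colsAux]
  | cons v rest ih =>
    rw [List.length_cons, List.range_succ_eq_map, List.filter_cons]
    have hmap : (List.map Nat.succ (List.range rest.length)).filter
        (fun j => (v :: rest).getD j 0 == 1)
        = ((List.range rest.length).filter (fun j => rest.getD j 0 == 1)).map Nat.succ := by
      rw [List.filter_map]
      rfl
    have hshift : colsAux rest 1 = (colsAux rest 0).map Nat.succ := by
      rw [colsAux_shift]
    rw [hmap, ← ih]
    by_cases hv : v = 1 <;>
      simp [colsAux, hv, hshift]

lemma snd_rowRooks (i : Nat) : ∀ (cells : List Int) (j : Nat),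
    (rowRooks i cells j).map Prod.snd = colsAux cells j := by
  intro cells
  induction cells with
  | nil => intro j; simp [rowRooks, colsAux]
  | cons v rest ih =>
    intro j
    by_cases hv : v = 1 <;> simp [rowRooks, colsAux, hv, ih]

lemma fst_rowRooks (i : Nat) : ∀ (cells : List Int) (j : Nat),
    (rowRooks i cells j).map Prod.fst = List.replicate (colsAux cells j).length i := by
  intro cells
  induction cells with
  | nil => intro j; simp [rowRooks, colsAux]
  | cons v rest ih =>
    intro j
    by_cases hv : v = 1 <;> simp [rowRooks, colsAux, hv, ih, List.replicate_succ]

lemma snd_rookCells : ∀ (cbs : List (List Int)) (i : Nat),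
    (rookCells cbs i).map Prod.snd = cbs.flatMap (fun row => colsAux row 0) := by
  intro cbs
  induction cbs with
  | nil => intro i; simp [rookCells]
  | cons row rest ih => intro i; simp [rookCells, snd_rowRooks, ih]

lemma fst_rookCells_lb : ∀ (cbs : List (List Int)) (i x : Nat),
    x ∈ (rookCells cbs i).map Prod.fst → i ≤ x := by
  intro cbs
  induction cbs with
  | nil => intro i x hx; simp [rookCells] at hx
  | cons row rest ih =>
    intro i x hx
    rw [rookCells, List.map_append, List.mem_append, fst_rowRooks] at hx
    rcases hx with h | h
    · exact le_of_eq (List.eq_of_mem_replicate h).symm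
    · exact Nat.le_of_succ_le (ih (i + 1) x h)

lemma fst_rookCells_nodup_iff : ∀ (cbs : List (List Int)) (i : Nat),
    ((rookCells cbs i).map Prod.fst).Nodup ↔ ∀ row ∈ cbs, (colsAux row 0).length ≤ 1 := by
  intro cbs
  induction cbs with
  | nil => intro i; simp [rookCells]
  | cons row rest ih =>
    intro i
    rw [rookCells, List.map_append, List.nodup_append, fst_rowRooks]
    constructor
    · rintro ⟨h1, h2, h3⟩
      intro r hr
      rcases List.mem_cons.mp hr with rfl | hr'
      · exact List.nodup_replicate.mp h1
      · exact (ih (i + 1)).mp h2 r hr'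
    · intro h
      refine ⟨List.nodup_replicate.mpr (h row List.mem_cons_self), ?_, ?_⟩
      · exact (ih (i + 1)).mpr (fun r hr => h r (List.mem_cons_of_mem _ hr))
      · intro x hx y hy
        have hx' := List.eq_of_mem_replicate hx
        have hy' := fst_rookCells_lb rest (i + 1) y hy
        omega

lemma pairsOK_iff : ∀ (R : List (Nat × Nat)),
    pairsOK R = true ↔ ((R.map Prod.fst).Nodup ∧ (R.map Prod.snd).Nodup) := by
  intro R
  induction R with
  | nil => simp [pairsOK]
  | cons a rest ih =>
    rw [pairsOK, Bool.and_eq_true, List.all_eq_true, ih,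
      List.map_cons, List.map_cons, List.nodup_cons, List.nodup_cons]
    constructor
    · rintro ⟨h1, h2, h3⟩
      have hp : ∀ b ∈ rest, a.1 ≠ b.1 ∧ a.2 ≠ b.2 := by
        intro b hb
        have := h1 b hb
        rw [Bool.and_eq_true, bne_iff_ne, bne_iff_ne] at this
        exact this
      refine ⟨⟨?_, h2⟩, ?_, h3⟩
      · intro hm
        rcases List.mem_map.mp hm with ⟨b, hb, hbe⟩
        exact (hp b hb).1 hbe.symm
      · intro hm
        rcases List.mem_map.mp hm with ⟨b, hb, hbe⟩
        exact (hp b hb).2 hbe.symm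
    · rintro ⟨⟨hf, h2⟩, hs, h3⟩
      refine ⟨?_, h2, h3⟩
      intro b hb
      rw [Bool.and_eq_true, bne_iff_ne, bne_iff_ne]
      constructor
      · intro he; exact hf (List.mem_map.mpr ⟨b, hb, he.symm⟩)
      · intro he; exact hs (List.mem_map.mpr ⟨b, hb, he.symm⟩)

theorem rooks_are_safe_spec : Claim_equal_rooks_are_safe := by
  intro cb _dom hpre
  unfold Spec_rooks_are_safe
  cases cb with
  | nil => rfl
  | cons r0 rest =>
    have hcols : ∀ r ∈ r0 :: rest, colsAux r 0 = rcs r0.length r := by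
      intro r hr
      obtain ⟨hle, hno⟩ := by simpa using hpre r hr
      rw [colsAux_zero, rcs]
      have hsplit : r.length = r0.length + (r.length - r0.length) := by omega
      rw [hsplit, List.range_add, List.filter_append]
      have : (List.map (fun k => r0.length + k) (List.range (r.length - r0.length))).filter
          (fun j => r.getD j 0 == 1) = [] := by
        apply List.filter_eq_nil_iff.mpr
        intro j hj
        rcases List.mem_map.mp hj with ⟨k, hk, rfl⟩
        have hk' : k < r.length - r0.length := List.mem_range.mp hk
        have hget : r.getD (r0.length + k) 0 = (r.drop r0.length).getD k 0 := by
          unfold List.getD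
          rw [List.getElem?_drop]
        simp only [beq_iff_eq, hget]
        cases hg : (r.drop r0.length)[k]? with
        | none =>
          have hlen : (r.drop r0.length).length ≤ k := List.getElem?_eq_none_iff.mp hg
          rw [List.length_drop] at hlen
          omega
        | some v =>
          have hv : v ∈ r.drop r0.length := List.mem_of_getElem? hg
          simp [List.getD, hg, hno v hv]
      rw [this, List.append_nil]
    have hA := outerChar r0.length (r0 :: rest) 0 PySem.Set.empty PySem.Set.empty
      (by intro x hx; exact absurd hx (List.not_mem_nil))
    have hsnd : ((rookCells (r0 :: rest) 0).map Prod.snd)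
        = (r0 :: rest).flatMap (rcs r0.length) := by
      rw [snd_rookCells]
      exact List.flatMap_congr hcols
    have hAB : rooks_are_safe (r0 :: rest) = true ↔ rooks_are_safe_alt (r0 :: rest) = true := by
      rw [rooks_are_safe, List.headD_cons, hA, rooks_are_safe_alt, pairsOK_iff,
        fst_rookCells_nodup_iff, hsnd]
      constructor
      · rintro ⟨h1, h2, _⟩
        refine ⟨?_, h2⟩
        intro r hr
        rw [hcols r hr]
        exact h1 r hr
      · rintro ⟨h1, h2⟩
        refine ⟨?_, h2, ?_⟩
        · intro r hr
          rw [← hcols r hr]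
          exact h1 r hr
        · intro j _ hj
          exact absurd hj (List.not_mem_nil)
    cases hB : rooks_are_safe_alt (r0 :: rest) with
    | true => exact hAB.mpr hB
    | false =>
      apply Bool.eq_false_iff.mpr
      intro hA'
      rw [hAB.mp hA'] at hB
      exact Bool.true_eq_false.mp hB
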